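-- pv_equiv track=rewrite | github.com/SizeLee/LossPatternTreeNN | NormalNN.py | stringcontain
-- ===== SOURCE A (Python) =====
-- def stringcontain(strcontained, str):
--     containindex = []
--     for i in range(len(strcontained)):
--         if strcontained[i] == '1' and str[i] != '1':
--             containindex = []
--             break
--         elif strcontained[i] == '1' and str[i] == '1':
--             containindex.append(i)
--
--     return containindex
-- ===== SOURCE B (Python) =====
-- def stringcontain(strcontained, str):
--     ones = [i for i, c in enumerate(strcontained) if c == '1']
--     if all(str[i] == '1' for i in ones):
--         return ones
--     return []
-- ===== Notes on version B (the rewrite author's own statement) =====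
-- stated objective: simpler
-- what changed: Replaces the single interleaved index loop with break-and-reset by a build-then-validate decomposition: collect the '1' positions in one comprehension, then return them iff all of them carry '1' in str (validated in the same left-to-right order, so an IndexError fires at the same index).
import Mathlib
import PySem

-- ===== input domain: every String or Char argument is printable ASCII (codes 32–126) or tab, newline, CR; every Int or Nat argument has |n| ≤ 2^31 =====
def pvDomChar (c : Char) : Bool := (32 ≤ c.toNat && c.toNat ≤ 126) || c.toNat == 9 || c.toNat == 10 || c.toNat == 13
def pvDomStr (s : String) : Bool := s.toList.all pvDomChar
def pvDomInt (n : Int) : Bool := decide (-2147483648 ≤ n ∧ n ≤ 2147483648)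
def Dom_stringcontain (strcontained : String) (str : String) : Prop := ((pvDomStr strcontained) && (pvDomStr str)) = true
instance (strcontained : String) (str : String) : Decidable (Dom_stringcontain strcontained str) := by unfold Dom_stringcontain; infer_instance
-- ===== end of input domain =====

-- B replaces A's interleaved break-and-reset loop by a build-then-validate decomposition
-- (collect the '1' positions, then keep them iff all carry '1' in str); objective: simpler.

-- ===== PORT A =====
-- the for-loop of A: walks strcontained with index i, breaks (returning []) on the first
-- '1' position whose str counterpart is not '1', appends matching positions otherwise.
-- str[i] on an out-of-range i raises in Python (excluded by Pre_); getD supplies ' ' there.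
def stringcontainLoop (rem : List Char) (s : List Char) (i : Nat) (acc : List Int) : List Int :=
  match rem with
  | [] => acc
  | c :: t =>
    if c == '1' && !(s.getD i ' ' == '1') then []
    else if c == '1' && s.getD i ' ' == '1' then stringcontainLoop t s (i + 1) (acc ++ [(i : Int)])
    else stringcontainLoop t s (i + 1) acc

def stringcontain (strcontained : String) (str : String) : List Int :=
  stringcontainLoop strcontained.toList str.toList 0 []

-- ===== PORT B =====
def stringcontain_alt (strcontained : String) (str : String) : List Int :=
  let ones := ((PySem.List.enumerate strcontained.toList 0).filter (fun p => p.2 == '1')).map (fun p => p.1)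
  if ones.all (fun i => str.toList.getD i.toNat ' ' == '1') then ones else []

-- ===== PRECONDITION & SPEC =====
-- Pre_ excludes exactly the inputs on which Python A raises IndexError: a '1' in strcontained
-- at an index past the end of str that the loop reaches (no earlier failing '1' position).
def Pre_stringcontain (strcontained : String) (str : String) : Prop :=
  ∀ i, i < strcontained.toList.length → strcontained.toList.getD i ' ' = '1' →
    str.toList.length ≤ i →
      ∃ j, j < i ∧ strcontained.toList.getD j ' ' = '1' ∧ str.toList.getD j ' ' ≠ '1'
instance (strcontained : String) (str : String) : Decidable (Pre_stringcontain strcontained str) := by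
  unfold Pre_stringcontain; infer_instance

def pvWitness_stringcontain : String × String := ("101", "111")

def Spec_stringcontain (strcontained : String) (str : String) (out : List Int) : Prop := out = stringcontain_alt strcontained str
instance (strcontained : String) (str : String) (out : List Int) : Decidable (Spec_stringcontain strcontained str out) := by unfold Spec_stringcontain; infer_instance

-- ===== CLAIM (what is proved, stated in full; the proofs are below) =====
def Claim_equal_stringcontain : Prop := ∀ (strcontained : String) (str : String), Dom_stringcontain strcontained str → Pre_stringcontain strcontained str → Spec_stringcontain strcontained str (stringcontain strcontained str)

-- ===== LEMMAS AND PROOFS =====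

lemma stringcontainLoop_eq (s : List Char) :
    ∀ (t : List Char) (i : Nat) (acc : List Int),
      stringcontainLoop t s i acc =
        (if (((PySem.List.enumerate t (i : Int)).filter (fun p => p.2 == '1')).map (fun p => p.1)).all
              (fun j => s.getD j.toNat ' ' == '1')
         then acc ++ ((PySem.List.enumerate t (i : Int)).filter (fun p => p.2 == '1')).map (fun p => p.1)
         else []) := by
  intro t
  induction t with
  | nil => intro i acc; simp [stringcontainLoop, PySem.List.enumerate_nil]
  | cons c t ih =>
    intro i acc
    rw [show (i : Int) = ((i : Nat) : Int) from rfl]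
    simp only [stringcontainLoop, PySem.List.enumerate_cons, List.filter_cons,
      List.getD_eq_getElem?_getD,
      show ((i : Nat) : Int) + 1 = ((i + 1 : Nat) : Int) by push_cast; ring]
    by_cases hc : c = '1'
    · by_cases hs : s[i]?.getD ' ' = '1'
      · have ih' := ih (i + 1) (acc ++ [(i : Int)])
        simp only [List.getD_eq_getElem?_getD, Nat.cast_add, Nat.cast_one] at ih'
        simp only [hc, hs, beq_self_eq_true, Bool.not_true, Bool.and_false, Bool.and_true,
          if_true, if_false, Bool.false_eq_true, ih', List.map_cons,
          List.all_cons, Int.toNat_natCast, Bool.true_and]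
        by_cases hall : ((List.map (fun p => p.1) (List.filter (fun p => p.2 == '1')
            (PySem.List.enumerate t ((i + 1 : Nat) : Int)))).all fun j => s[j.toNat]?.getD ' ' == '1') = true
        · simp
        · simp
      · have hc' : (c == '1') = true := by simp [hc]
        have hs' : (s[i]?.getD ' ' == '1') = false := by simp [hs]
        simp [hc', hs', Int.toNat_natCast]
    · have hc' : (c == '1') = false := by simp [hc]
      have ih' := ih (i + 1) acc
      simp only [List.getD_eq_getElem?_getD, Nat.cast_add, Nat.cast_one] at ih'
      rw [ih', hc']
      simp

-- ===== VERDICT (by name: the statement is the Claim_ definition above) =====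
theorem stringcontain_spec : Claim_equal_stringcontain := by
  intro sc s _ _
  unfold Spec_stringcontain stringcontain stringcontain_alt
  simpa using stringcontainLoop_eq s.toList sc.toList 0 []
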